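-- pv_equiv track=rewrite | github.com/akashprap/Coding-Problems | 2724-convert-an-array-into-a-2d-array-with-conditions/convert-an-array-into-a-2d-array-with-conditions.py | findMatrix
-- ===== SOURCE A (Python) =====
-- from typing import List
--
-- def findMatrix(nums: List[int]) -> List[List[int]]:
--     mat=[[]]
--     for num in nums:
--         for i in mat:
--             if num not in i:
--                 i.append(num)
--                 break
--         else:
--             temp=[]
--             temp.append(num)
--             mat.append(temp)
--     return mat
-- ===== SOURCE B (Python) =====
-- def findMatrix(nums):
--     cnt = {}
--     rows = []
--     for num in nums:
--         c = cnt.get(num, 0)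
--         if c == len(rows):
--             rows.append([])
--         rows[c].append(num)
--         cnt[num] = c + 1
--     return rows
-- ===== Notes on version B (the rewrite author's own statement) =====
-- stated objective: faster
-- what changed: Replaces the linear scan over all existing rows per element (membership test in each row) by a single pass that counts occurrences in a dict and places each element directly into row count[num].
-- intended difference: On the empty list A returns [[]] (its seed row, an artefact of initialising mat=[[]]), B returns [], the natural empty matrix with no spurious empty row. — e.g. on findMatrix([]): A returns [[]], B returns []
import Mathlib
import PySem

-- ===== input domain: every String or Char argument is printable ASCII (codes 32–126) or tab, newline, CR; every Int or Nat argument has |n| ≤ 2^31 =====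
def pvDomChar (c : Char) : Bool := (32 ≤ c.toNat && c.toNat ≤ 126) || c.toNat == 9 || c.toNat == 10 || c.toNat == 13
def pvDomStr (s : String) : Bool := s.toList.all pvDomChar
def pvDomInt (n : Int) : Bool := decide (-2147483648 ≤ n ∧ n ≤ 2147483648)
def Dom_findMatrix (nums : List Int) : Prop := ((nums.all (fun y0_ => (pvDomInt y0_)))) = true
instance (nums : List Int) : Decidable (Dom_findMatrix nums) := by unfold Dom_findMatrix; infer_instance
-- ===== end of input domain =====

-- B replaces A's per-element scan over all rows by a counting dict (row index = current count); faster (asymptotic).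

-- ===== PORT A =====
-- inner 'for i in mat: … break / else: mat.append([num])' as structural recursion over mat
def placeA (num : Int) : List (List Int) → List (List Int)
  | [] => [[num]]
  | r :: rs => if num ∈ r then r :: placeA num rs else (r ++ [num]) :: rs

def findMatrix (nums : List Int) : List (List Int) :=
  nums.foldl (fun mat num => placeA num mat) [[]]

-- ===== PORT B =====
-- rows[c].append(num); c is the dict count, always a nonnegative in-range index (invariant of the loop), so .toNat is exact here
def appendAt : List (List Int) → Nat → Int → List (List Int)
  | [], _, _ => []
  | r :: rs, 0, x => (r ++ [x]) :: rs
  | r :: rs, n + 1, x => r :: appendAt rs n x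

def altStep (st : PySem.Dict Int Int × List (List Int)) (num : Int) :
    PySem.Dict Int Int × List (List Int) :=
  let c := st.1.getD num 0
  let rows := if c = (st.2.length : Int) then st.2 ++ [[]] else st.2
  (st.1.insert num (c + 1), appendAt rows c.toNat num)

def findMatrix_alt (nums : List Int) : List (List Int) :=
  (nums.foldl altStep (PySem.Dict.empty, [])).2

-- ===== PRECONDITION & SPEC =====
-- On the empty list A returns [[]] (its seed row, an artefact of initialising mat=[[]]); B returns [],
-- the natural empty matrix with no spurious empty row, which is the intended value.
def D_findMatrix (nums : List Int) : Prop := nums = []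
instance (nums : List Int) : Decidable (D_findMatrix nums) := by unfold D_findMatrix; infer_instance

def Spec_findMatrix (nums : List Int) (out : List (List Int)) : Prop :=
  ¬ D_findMatrix nums → out = findMatrix_alt nums
instance (nums : List Int) (out : List (List Int)) : Decidable (Spec_findMatrix nums out) := by
  unfold Spec_findMatrix; infer_instance

def pvDiffWitness_findMatrix : List Int := []
def pvDiffWitnessOut_findMatrix : (List (List Int)) × (List (List Int)) := ([[]], [])

-- ===== CLAIM (what is proved, stated in full; the proofs are below) =====
def Claim_unchanged_findMatrix : Prop :=
  ∀ (nums : List Int), Dom_findMatrix nums → Spec_findMatrix nums (findMatrix nums)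
def Claim_changed_findMatrix : Prop :=
  Dom_findMatrix (pvDiffWitness_findMatrix) ∧ D_findMatrix (pvDiffWitness_findMatrix) ∧
  findMatrix (pvDiffWitness_findMatrix) = pvDiffWitnessOut_findMatrix.1 ∧
  findMatrix_alt (pvDiffWitness_findMatrix) = pvDiffWitnessOut_findMatrix.2 ∧
  pvDiffWitnessOut_findMatrix.1 ≠ pvDiffWitnessOut_findMatrix.2
def Claim_exact_findMatrix : Prop :=
  ∀ (nums : List Int), Dom_findMatrix nums → D_findMatrix nums →
    findMatrix nums ≠ findMatrix_alt nums

-- ===== LEMMAS AND PROOFS =====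

-- number of rows of mat that contain v
def cntRows (v : Int) (mat : List (List Int)) : Nat :=
  mat.countP (fun r => decide (v ∈ r))

-- membership in rows is downward closed (earlier rows contain everything later rows do)
def Mono (mat : List (List Int)) : Prop :=
  List.Pairwise (fun r s => ∀ v, v ∈ s → v ∈ r) mat

theorem cntRows_eq_zero {num : Int} {rs : List (List Int)}
    (h : ∀ s ∈ rs, num ∉ s) : cntRows num rs = 0 := by
  unfold cntRows
  rw [List.countP_eq_zero]
  intro s hs
  simpa using h s hs

theorem appendAt_append_nil (xs : List (List Int)) (num : Int) :
    appendAt (xs ++ [[]]) xs.length num = xs ++ [[num]] := by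
  induction xs with
  | nil => simp [appendAt]
  | cons r rs ih => simp [appendAt, ih]

-- characterisation of A's placement step via the row count
theorem placeA_char (num : Int) (mat : List (List Int)) (hM : Mono mat) :
    placeA num mat =
      (if cntRows num mat = mat.length
        then mat ++ [[num]]
        else appendAt mat (cntRows num mat) num) := by
  unfold Mono at hM
  induction mat with
  | nil => simp [placeA, cntRows]
  | cons r rs ih =>
    rw [List.pairwise_cons] at hM
    obtain ⟨hr, hrs⟩ := hM
    by_cases hmem : num ∈ r
    · have hc : cntRows num (r :: rs) = cntRows num rs + 1 := by
        simp [cntRows, hmem]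
      rw [hc]
      simp only [placeA, hmem, if_pos, List.length_cons]
      rw [ih hrs]
      by_cases he : cntRows num rs = rs.length
      · simp [he]
      · simp [he, appendAt]
    · have hnone : ∀ s ∈ rs, num ∉ s := fun s hs hc => hmem (hr s hs num hc)
      have hc : cntRows num (r :: rs) = 0 := by
        have h0 : cntRows num rs = 0 := cntRows_eq_zero hnone
        simp only [cntRows, List.countP_cons] at h0 ⊢
        simp [hmem, h0]
      rw [hc]
      simp [placeA, hmem, appendAt]

theorem cntRows_placeA_self (num : Int) (mat : List (List Int)) :
    cntRows num (placeA num mat) = cntRows num mat + 1 := by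
  induction mat with
  | nil => simp [placeA, cntRows]
  | cons r rs ih =>
    by_cases hmem : num ∈ r
    · simp [placeA, hmem, cntRows] at *
      omega
    · simp [placeA, hmem, cntRows]

theorem cntRows_placeA_ne (v num : Int) (hne : v ≠ num) (mat : List (List Int)) :
    cntRows v (placeA num mat) = cntRows v mat := by
  induction mat with
  | nil => simp [placeA, cntRows, hne]
  | cons r rs ih =>
    by_cases hmem : num ∈ r
    · simp only [placeA, if_pos hmem, cntRows, List.countP_cons] at ih ⊢
      omega
    · have hiff : (v ∈ r ++ [num]) ↔ (v ∈ r) := by simp [hne]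
      simp [placeA, hmem, cntRows, List.countP_cons, hiff]

theorem mem_placeA {num : Int} {P : Int → Prop} (hP : P num) :
    ∀ (rs : List (List Int)), (∀ s ∈ rs, ∀ v ∈ s, P v) →
      ∀ s ∈ placeA num rs, ∀ v ∈ s, P v := by
  intro rs
  induction rs with
  | nil =>
    intro _ s hs v hv
    simp only [placeA, List.mem_singleton] at hs
    subst hs
    simp only [List.mem_singleton] at hv
    subst hv; exact hP
  | cons r rs ih =>
    intro h s hs v hv
    by_cases hmem : num ∈ r
    · simp only [placeA] at hs
      rw [if_pos hmem] at hs
      rcases List.mem_cons.1 hs with hs | hs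
      · exact h s (by simp [hs]) v hv
      · exact ih (fun t ht => h t (List.mem_cons_of_mem _ ht)) s hs v hv
    · simp only [placeA] at hs
      rw [if_neg hmem] at hs
      rcases List.mem_cons.1 hs with hs | hs
      · rw [hs] at hv
        rcases List.mem_append.1 hv with hv | hv
        · exact h r (by simp) v hv
        · simp only [List.mem_singleton] at hv
          subst hv; exact hP
      · exact h s (List.mem_cons_of_mem _ hs) v hv

theorem mono_placeA (num : Int) (mat : List (List Int)) (hM : Mono mat) :
    Mono (placeA num mat) := by
  unfold Mono at hM ⊢
  induction mat with
  | nil => simp [placeA]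
  | cons r rs ih =>
    rw [List.pairwise_cons] at hM
    obtain ⟨hr, hrs⟩ := hM
    by_cases hmem : num ∈ r
    · simp only [placeA]
      rw [if_pos hmem, List.pairwise_cons]
      refine ⟨?_, ih hrs⟩
      intro s hs v hv
      exact mem_placeA hmem rs hr s hs v hv
    · simp only [placeA]
      rw [if_neg hmem, List.pairwise_cons]
      refine ⟨?_, hrs⟩
      intro s hs v hv
      exact List.mem_append.2 (Or.inl (hr s hs v hv))

theorem loop_eq (nums : List Int) :
    ∀ (mat : List (List Int)) (d : PySem.Dict Int Int),
      Mono mat → (∀ v, d.getD v 0 = (cntRows v mat : Int)) →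
      nums.foldl (fun m n => placeA n m) mat = (nums.foldl altStep (d, mat)).2 := by
  induction nums with
  | nil => intro mat d _ _; rfl
  | cons num rest ih =>
    intro mat d hM hd
    have hc : d.getD num 0 = (cntRows num mat : Int) := hd num
    have hstep : (altStep (d, mat) num).2 = placeA num mat := by
      unfold altStep
      simp only [hc]
      rw [placeA_char num mat hM]
      by_cases he : cntRows num mat = mat.length
      · simp only [he, if_pos, Int.toNat_natCast]
        exact appendAt_append_nil mat num
      · have hne : ¬ ((cntRows num mat : Int)) = (mat.length : Int) :=
          fun h => he (Nat.cast_inj.mp h)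
        simp [hne, he]
    have hM' : Mono (placeA num mat) := mono_placeA num mat hM
    have hd' : ∀ v, (altStep (d, mat) num).1.getD v 0 = (cntRows v (placeA num mat) : Int) := by
      intro v
      unfold altStep
      simp only
      rw [PySem.Dict.getD_insert]
      by_cases hv : v = num
      · subst hv
        rw [if_pos rfl, hc, cntRows_placeA_self]
        push_cast; ring
      · rw [if_neg hv, hd v, cntRows_placeA_ne v num hv]
    have hrec := ih (placeA num mat) (altStep (d, mat) num).1 hM' hd'
    simp only [List.foldl_cons]
    rw [hrec, ← hstep]

-- ===== VERDICT (by name: the statement is the Claim_ definition above) =====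
theorem findMatrix_spec : Claim_unchanged_findMatrix := by
  intro nums _
  unfold Spec_findMatrix
  intro hD
  match nums, hD with
  | [], hD => exact absurd rfl hD
  | num :: rest, _ =>
    show (num :: rest).foldl (fun m n => placeA n m) [[]] = _
    unfold findMatrix_alt
    simp only [List.foldl_cons]
    have h1 : placeA num [[]] = [[num]] := by simp [placeA]
    have h2 : altStep (PySem.Dict.empty, []) num = (PySem.Dict.empty.insert num 1, [[num]]) := by
      unfold altStep
      simp [PySem.Dict.getD_empty, appendAt]
    rw [h1, h2]
    refine loop_eq rest [[num]] (PySem.Dict.empty.insert num 1) ?_ ?_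
    · simp [Mono]
    · intro v
      rw [PySem.Dict.getD_insert]
      by_cases hv : v = num
      · subst hv; simp [cntRows]
      · simp [hv, PySem.Dict.getD_empty, cntRows]

theorem findMatrix_changed : Claim_changed_findMatrix := by
  unfold Claim_changed_findMatrix; decide

theorem findMatrix_tight : Claim_exact_findMatrix := by
  intro nums _ hD
  subst hD
  decide
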